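-- pv_equiv track=rewrite | github.com/nao7sep/shared | apps/polychat/src/polychat/formatting/text.py | text_to_lines
-- ===== SOURCE A (Python) =====
-- def text_to_lines(text: str) -> list[str]:
--     """Convert multiline text to line array with trimming."""
--     lines = text.split("\n")
--
--     start = 0
--     for index, line in enumerate(lines):
--         if line.strip():
--             start = index
--             break
--     else:
--         return []
--
--     end = len(lines)
--     for index in range(len(lines) - 1, -1, -1):
--         if lines[index].strip():
--             end = index + 1
--             break
--
--     return lines[start:end]
-- ===== SOURCE B (Python) =====
-- def text_to_lines(text: str) -> list[str]:
--     """Convert multiline text to line array with trimming."""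
--     lines = text.split("\n")
--     content = [i for i, line in enumerate(lines) if line.strip()]
--     if not content:
--         return []
--     return lines[content[0]:content[-1] + 1]
-- ===== Notes on version B (the rewrite author's own statement) =====
-- stated objective: simpler
-- what changed: Replaced A's two directional early-stopping boundary scans (forward for the first non-blank line, backward over a reversed index range for the last) with a single comprehension collecting the indices of non-blank lines followed by one slice from the first to the last collected index.
import Mathlib
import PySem

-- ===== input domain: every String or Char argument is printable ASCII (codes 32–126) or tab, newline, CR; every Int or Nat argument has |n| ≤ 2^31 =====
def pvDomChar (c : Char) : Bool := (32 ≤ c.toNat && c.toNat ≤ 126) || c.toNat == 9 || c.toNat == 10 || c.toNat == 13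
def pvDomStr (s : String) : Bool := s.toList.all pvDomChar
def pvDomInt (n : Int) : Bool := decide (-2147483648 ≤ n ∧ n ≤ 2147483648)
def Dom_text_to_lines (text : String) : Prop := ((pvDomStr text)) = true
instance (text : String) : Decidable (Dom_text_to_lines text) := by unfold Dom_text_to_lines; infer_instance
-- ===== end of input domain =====

-- B replaces A's two directional early-stopping boundary scans with one pass collecting the
-- indices of non-blank lines and a single slice (objective: simpler).

-- ===== PORT A =====

-- A's first loop: 'for index, line in enumerate(lines): if line.strip(): start = index; break'
-- (none = the for-else branch: no non-blank line found).
def tlA_findStart : List (Int × String) → Option Int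
  | [] => none
  | (i, l) :: rest => if PySem.Str.strip l ≠ "" then some i else tlA_findStart rest

-- A's second loop: 'for index in range(len(lines)-1, -1, -1): if lines[index].strip(): end = index+1; break'
-- (lines[index] with index drawn from the range is always in bounds, so pyGetD is exact here).
def tlA_findEnd : List Int → List String → Option Int
  | [], _ => none
  | i :: rest, lines =>
      if PySem.Str.strip (PySem.List.pyGetD lines i "") ≠ "" then some (i + 1)
      else tlA_findEnd rest lines

def text_to_lines (text : String) : List String :=
  -- text.split("\n"): sep is non-empty, so split? is always 'some'; getD is exact here
  let lines := (PySem.Str.split? text "\n").getD []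
  match tlA_findStart (PySem.List.enumerate lines 0) with
  | none => []
  | some start =>
      let e := (tlA_findEnd (PySem.List.pyRange (PySem.List.len lines - 1) (-1) (-1)) lines).getD
                 (PySem.List.len lines)
      PySem.List.slice lines (some start) (some e)

-- ===== PORT B =====

def text_to_lines_alt (text : String) : List String :=
  let lines := (PySem.Str.split? text "\n").getD []
  -- [i for i, line in enumerate(lines) if line.strip()]
  let content := (PySem.List.enumerate lines 0).filterMap
                   (fun il => if PySem.Str.strip il.2 ≠ "" then some il.1 else none)
  match content with
  | [] => []
  | i :: rest =>
      PySem.List.slice lines (some i) (some ((i :: rest).getLast (List.cons_ne_nil _ _) + 1))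

-- ===== PRECONDITION & SPEC =====
def Spec_text_to_lines (text : String) (out : List String) : Prop := out = text_to_lines_alt text
instance (text : String) (out : List String) : Decidable (Spec_text_to_lines text out) := by unfold Spec_text_to_lines; infer_instance

-- ===== CLAIM (what is proved, stated in full; the proofs are below) =====
def Claim_equal_text_to_lines : Prop := ∀ (text : String), Dom_text_to_lines text → Spec_text_to_lines text (text_to_lines text)

-- ===== LEMMAS AND PROOFS =====

-- A's forward scan is the head of the filtered index-pair list.
theorem tlA_findStart_eq (el : List (Int × String)) :
    tlA_findStart el
      = (el.filterMap (fun il => if PySem.Str.strip il.2 ≠ "" then some il.1 else none)).head? := by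
  induction el with
  | nil => rfl
  | cons p rest ih =>
      obtain ⟨i, l⟩ := p
      by_cases h : PySem.Str.strip l ≠ "" <;> simp [tlA_findStart, h, ih]

-- A's backward scan is the head of the filtered index list, plus one.
theorem tlA_findEnd_eq (is : List Int) (lines : List String) :
    tlA_findEnd is lines
      = ((is.filter (fun i => PySem.Str.strip (PySem.List.pyGetD lines i "") ≠ "")).head?).map (· + 1) := by
  induction is with
  | nil => rfl
  | cons i rest ih =>
      by_cases h : PySem.Str.strip (PySem.List.pyGetD lines i "") ≠ "" <;>
        simp [tlA_findEnd, h, ih]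

-- filterMap with an if-guard over a mapped range is a plain filter.
theorem filterMap_guard_eq_filter (is : List Int) (q : Int → Prop) [DecidablePred q] :
    is.filterMap (fun i => if q i then some i else none) = is.filter (fun i => decide (q i)) := by
  induction is with
  | nil => rfl
  | cons i rest ih => by_cases h : q i <;> simp [h, ih]

-- B's content list equals the filtered index range.
theorem content_eq (lines : List String) :
    (PySem.List.enumerate lines 0).filterMap
        (fun il => if PySem.Str.strip il.2 ≠ "" then some il.1 else none)
      = (PySem.List.pyRange 0 (PySem.List.len lines) 1).filter
          (fun i => PySem.Str.strip (PySem.List.pyGetD lines i "") ≠ "") := by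
  rw [PySem.List.enumerate_eq_map_pyRange (d := ""), List.filterMap_map]
  simp only [Function.comp_def]
  exact filterMap_guard_eq_filter _ _

-- ===== VERDICT (by name: the statement is the Claim_ definition above) =====
theorem text_to_lines_spec : Claim_equal_text_to_lines := by
  intro text _
  unfold Spec_text_to_lines
  simp only [text_to_lines, text_to_lines_alt]
  rw [tlA_findStart_eq, content_eq, tlA_findEnd_eq]
  have hrev : PySem.List.pyRange (PySem.List.len ((PySem.Str.split? text "\n").getD []) - 1) (-1) (-1)
      = (PySem.List.pyRange 0 (PySem.List.len ((PySem.Str.split? text "\n").getD [])) 1).reverse := by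
    rw [PySem.List.pyRange_neg_one_eq_reverse]; norm_num
  rw [hrev, List.filter_reverse]
  generalize (PySem.List.pyRange 0 (PySem.List.len ((PySem.Str.split? text "\n").getD [])) 1).filter
      (fun i => decide (PySem.Str.strip (PySem.List.pyGetD ((PySem.Str.split? text "\n").getD []) i "") ≠ "")) = I
  cases I with
  | nil => rfl
  | cons i rest =>
      simp only [List.head?_reverse]
      rw [List.getLast?_eq_some_getLast (List.cons_ne_nil i rest)]
      simp
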